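-- pv_equiv track=rewrite | github.com/trajectly/trajectly | src/trajectly/core/refinement/checker.py | _is_subsequence_with_matches
-- ===== SOURCE A (Python) =====
-- def _is_subsequence_with_matches(
--     baseline_names: list[str],
--     current_names: list[str],
-- ) -> tuple[bool, list[int], str | None]:
--     """Greedy O(|baseline| + |current|) subsequence check.
--
--     Returns (matched, match_indices, first_missing_name).
--     If matched is True, first_missing_name is None.
--     """
--     matches: list[int] = []
--     baseline_idx = 0
--     current_idx = 0
--
--     while baseline_idx < len(baseline_names) and current_idx < len(current_names):
--         if baseline_names[baseline_idx] == current_names[current_idx]: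
--             matches.append(current_idx)
--             baseline_idx += 1
--             current_idx += 1
--             continue
--         current_idx += 1
--
--     if baseline_idx == len(baseline_names):
--         return True, matches, None
--
--     return False, matches, baseline_names[baseline_idx]
-- ===== SOURCE B (Python) =====
-- def _is_subsequence_with_matches(
--     baseline_names: list[str],
--     current_names: list[str],
-- ) -> tuple[bool, list[int], str | None]:
--     """Occurrence-index map + binary search instead of a linear merge scan.
--
--     positions[name] is the ascending list of indices of name in current_names;
--     for each baseline name we binary-search the first occurrence strictly after
--     the previous match, which is exactly the greedy choice.
--     """
--     positions: dict[str, list[int]] = {}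
--     for j, name in enumerate(current_names):
--         positions.setdefault(name, []).append(j)
--
--     matches: list[int] = []
--     prev = -1
--     for name in baseline_names:
--         idxs = positions.get(name, [])
--         lo, hi = 0, len(idxs)
--         while lo < hi:  # first element of idxs strictly greater than prev
--             mid = (lo + hi) // 2
--             if idxs[mid] > prev:
--                 hi = mid
--             else:
--                 lo = mid + 1
--         if lo == len(idxs):
--             return False, matches, name
--         prev = idxs[lo]
--         matches.append(prev)
--     return True, matches, None
-- ===== Notes on version B (the rewrite author's own statement) =====
-- stated objective: alternative
-- what changed: Replaces A's single merge-style two-pointer scan with a different algorithm: one pass builds a dict mapping each name to its ascending occurrence indices in current_names, then each baseline name binary-searches that occurrence list for the first index after the previous match.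
import Mathlib
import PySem

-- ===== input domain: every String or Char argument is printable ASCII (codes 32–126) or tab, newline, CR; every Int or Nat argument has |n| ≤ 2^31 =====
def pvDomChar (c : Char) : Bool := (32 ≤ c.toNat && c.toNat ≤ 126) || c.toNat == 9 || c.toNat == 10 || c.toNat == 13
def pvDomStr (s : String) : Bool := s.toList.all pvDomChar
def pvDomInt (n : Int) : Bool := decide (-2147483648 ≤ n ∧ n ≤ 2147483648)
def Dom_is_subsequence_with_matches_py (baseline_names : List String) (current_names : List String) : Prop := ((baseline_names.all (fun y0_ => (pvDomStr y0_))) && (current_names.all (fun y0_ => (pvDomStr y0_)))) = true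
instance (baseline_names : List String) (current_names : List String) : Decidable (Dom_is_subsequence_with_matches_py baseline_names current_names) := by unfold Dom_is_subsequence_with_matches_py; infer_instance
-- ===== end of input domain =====

-- B replaces A's single two-pointer merge scan by a different algorithm: a dict of each name's
-- ascending occurrence indices in current_names, then a binary search per baseline name for the
-- first occurrence after the previous match (alternative decomposition; same greedy result).


-- ===== PORT A =====
-- A's while loop: two indices advancing over baseline/current; ms collects current indices.
def pvGoA (bl cl : List String) (bi ci : Nat) (ms : List Int) : Bool × List Int × Option String :=
  if h : bi < bl.length ∧ ci < cl.length then
    if bl[bi] = cl[ci] then pvGoA bl cl (bi + 1) (ci + 1) (ms ++ [(ci : Int)])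
    else pvGoA bl cl bi (ci + 1) ms
  else if bi = bl.length then (true, ms, none)
  else (false, ms, some (bl.getD bi ""))
termination_by cl.length - ci
decreasing_by all_goals omega

def is_subsequence_with_matches_py (baseline_names : List String) (current_names : List String) : Bool × List Int × Option String :=
  pvGoA baseline_names current_names 0 0 []

-- ===== PORT B =====
-- positions.setdefault(name, []).append(j) over enumerate(current_names)
def pvPositions (cl : List String) : PySem.Dict String (List Int) :=
  (PySem.List.enumerate cl 0).foldl
    (fun d p => PySem.Dict.modify d p.2 [] (fun l => l ++ [p.1])) PySem.Dict.empty

-- the while loop: first index in [lo, hi) with idxs[mid] > prev (idxs[mid] read as getD: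
-- every call keeps hi ≤ idxs.length and mid < hi, so the index is always in range — exact).
def pvBisect (idxs : List Int) (prev : Int) (lo hi : Nat) : Nat :=
  if lo < hi then
    let mid := (lo + hi) / 2
    if idxs.getD mid 0 > prev then pvBisect idxs prev lo mid
    else pvBisect idxs prev (mid + 1) hi
  else lo
termination_by hi - lo
decreasing_by all_goals omega

-- the for loop over baseline_names (idxs[lo] read as getD: guarded by lo ≠ len — exact).
def pvGoAlt (bs : List String) (pos : PySem.Dict String (List Int)) (prev : Int) (ms : List Int) :
    Bool × List Int × Option String :=
  match bs with
  | [] => (true, ms, none)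
  | name :: rest =>
    let idxs := pos.getD name []
    let lo := pvBisect idxs prev 0 idxs.length
    if lo = idxs.length then (false, ms, some name)
    else pvGoAlt rest pos (idxs.getD lo 0) (ms ++ [idxs.getD lo 0])

def is_subsequence_with_matches_py_alt (baseline_names : List String) (current_names : List String) : Bool × List Int × Option String :=
  pvGoAlt baseline_names (pvPositions current_names) (-1) []

-- ===== PRECONDITION & SPEC =====
def Spec_is_subsequence_with_matches_py (baseline_names : List String) (current_names : List String) (out : Bool × List Int × Option String) : Prop := out = is_subsequence_with_matches_py_alt baseline_names current_names
instance (baseline_names : List String) (current_names : List String) (out : Bool × List Int × Option String) : Decidable (Spec_is_subsequence_with_matches_py baseline_names current_names out) := by unfold Spec_is_subsequence_with_matches_py; infer_instance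

-- ===== CLAIM (what is proved, stated in full; the proofs are below) =====
def Claim_equal_is_subsequence_with_matches_py : Prop := ∀ (baseline_names : List String) (current_names : List String), Dom_is_subsequence_with_matches_py baseline_names current_names → Spec_is_subsequence_with_matches_py baseline_names current_names (is_subsequence_with_matches_py baseline_names current_names)

-- ===== LEMMAS AND PROOFS =====

-- Reference form: an advancing-iterator scan both ports are reduced to.
def pvScan (name : String) (it : List (Int × String)) : Option (Int × List (Int × String)) :=
  match it with
  | [] => none
  | (j, cname) :: rest => if cname = name then some (j, rest) else pvScan name rest

def pvRef (bs : List String) (it : List (Int × String)) (ms : List Int) : Bool × List Int × Option String :=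
  match bs with
  | [] => (true, ms, none)
  | name :: rest =>
    match pvScan name it with
    | none => (false, ms, some name)
    | some (j, it') => pvRef rest it' (ms ++ [j])

-- ascending list of indices (offset k) of name in cl
def idxsFrom (cl : List String) (k : Int) (name : String) : List Int :=
  match cl with
  | [] => []
  | c :: r => if c = name then k :: idxsFrom r (k + 1) name else idxsFrom r (k + 1) name

theorem pvRef_skip (n : String) (r : List String) (j : Int) (x : String) (t : List (Int × String))
    (m : List Int) (hne : x ≠ n) :
    pvRef (n :: r) ((j, x) :: t) m = pvRef (n :: r) t m := by
  simp [pvRef, pvScan, hne]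

-- A's scan equals the reference scan (proved in the previous style).
theorem pvGo_key (bl cl : List String) : ∀ (n bi ci : Nat) (ms : List Int),
    cl.length - ci = n → bi ≤ bl.length →
    pvGoA bl cl bi ci ms
      = pvRef (bl.drop bi) (PySem.List.enumerate (cl.drop ci) (ci : Int)) ms := by
  intro n
  induction n using Nat.strong_induction_on with
  | _ n ih =>
    intro bi ci ms hn hbi
    rw [pvGoA]
    by_cases h : bi < bl.length ∧ ci < cl.length
    · have hb : bl.drop bi = bl[bi] :: bl.drop (bi + 1) := List.drop_eq_getElem_cons h.1
      have hc : cl.drop ci = cl[ci] :: cl.drop (ci + 1) := List.drop_eq_getElem_cons h.2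
      rw [dif_pos h, hb, hc, PySem.List.enumerate_cons]
      by_cases heq : bl[bi] = cl[ci]
      · rw [if_pos heq]
        have : pvRef (bl[bi] :: bl.drop (bi + 1)) ((↑ci, cl[ci]) :: PySem.List.enumerate (cl.drop (ci + 1)) (↑ci + 1)) ms
            = pvRef (bl.drop (bi + 1)) (PySem.List.enumerate (cl.drop (ci + 1)) (↑ci + 1)) (ms ++ [(ci : Int)]) := by
          simp [pvRef, pvScan, heq.symm]
        rw [this]
        have hcast : ((ci : Int) + 1) = ((ci + 1 : Nat) : Int) := by push_cast; ring
        rw [hcast, ih (cl.length - (ci + 1)) (by omega) (bi + 1) (ci + 1) _ rfl (by omega)]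
      · rw [if_neg heq]
        have hne : cl[ci] ≠ bl[bi] := fun hx => heq hx.symm
        rw [pvRef_skip _ _ _ _ _ _ hne]
        have hcast : ((ci : Int) + 1) = ((ci + 1 : Nat) : Int) := by push_cast; ring
        rw [hcast, ← hb, ih (cl.length - (ci + 1)) (by omega) bi (ci + 1) _ rfl hbi]
    · rw [dif_neg h]
      by_cases hbl : bi = bl.length
      · rw [if_pos hbl]
        have : bl.drop bi = [] := List.drop_eq_nil_of_le (by omega)
        simp [this, pvRef]
      · rw [if_neg hbl]
        have hbi' : bi < bl.length := by omega
        have hci : cl.length ≤ ci := by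
          by_contra hx; exact h ⟨hbi', by omega⟩
        have hcd : cl.drop ci = [] := List.drop_eq_nil_of_le hci
        have hb : bl.drop bi = bl[bi] :: bl.drop (bi + 1) := List.drop_eq_getElem_cons hbi'
        rw [hcd, hb, PySem.List.enumerate_nil]
        simp [pvRef, pvScan, List.getElem?_eq_getElem hbi']

theorem swapFilter (name : String) (cl : List String) :
    ∀ (k : Int), ((((PySem.List.enumerate cl k).map (fun p => (p.2, p.1))).filter
        (fun p => p.1 == name)).map (fun p => p.2)) = idxsFrom cl k name := by
  induction cl with
  | nil => intro k; simp [PySem.List.enumerate_nil, idxsFrom]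
  | cons c r ih =>
    intro k
    rw [PySem.List.enumerate_cons]
    by_cases hc : c = name
    · simp [idxsFrom, hc, ih (k + 1)]
    · simp [idxsFrom, hc, ih (k + 1)]

-- the built dict reads back as idxsFrom
theorem pvPositions_getD (cl : List String) (name : String) :
    (pvPositions cl).getD name [] = idxsFrom cl 0 name := by
  unfold pvPositions
  rw [show ((PySem.List.enumerate cl 0).foldl
      (fun d p => PySem.Dict.modify d p.2 [] (fun l => l ++ [p.1])) PySem.Dict.empty)
    = (((PySem.List.enumerate cl 0).map (fun p => (p.2, p.1))).foldl
      (fun d p => PySem.Dict.modify d p.1 [] (fun l => l ++ [p.2])) PySem.Dict.empty) from by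
        rw [List.foldl_map]]
  rw [PySem.Dict.getD_foldl_modify_append]
  simp [swapFilter name cl 0]

theorem idxsFrom_bounds (cl : List String) (name : String) :
    ∀ (k : Int), ∀ x ∈ idxsFrom cl k name, k ≤ x ∧ x < k + cl.length := by
  induction cl with
  | nil => simp [idxsFrom]
  | cons c r ih =>
    intro k x hx
    simp only [idxsFrom] at hx
    by_cases hc : c = name
    · rw [if_pos hc] at hx
      rcases List.mem_cons.mp hx with h | h
      · subst h; constructor <;> simp
      · have := ih (k + 1) x h; simp at this ⊢; omega
    · rw [if_neg hc] at hx
      have := ih (k + 1) x hx; simp at this ⊢; omega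

theorem idxsFrom_sorted (cl : List String) (name : String) :
    ∀ (k : Int), (idxsFrom cl k name).Pairwise (· < ·) := by
  induction cl with
  | nil => simp [idxsFrom]
  | cons c r ih =>
    intro k
    simp only [idxsFrom]
    by_cases hc : c = name
    · rw [if_pos hc]
      exact List.pairwise_cons.mpr ⟨fun x hx => by
        have := idxsFrom_bounds r name (k + 1) x hx; omega, ih (k + 1)⟩
    · rw [if_neg hc]; exact ih (k + 1)

theorem idxsFrom_split (cl : List String) (name : String) :
    ∀ (m : Nat) (k : Int), idxsFrom cl k name
      = idxsFrom (cl.take m) k name ++ idxsFrom (cl.drop m) (k + m) name := by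
  induction cl with
  | nil => simp [idxsFrom]
  | cons c r ih =>
    intro m k
    cases m with
    | zero => simp [idxsFrom]
    | succ m' =>
      simp only [List.take_succ_cons, List.drop_succ_cons, idxsFrom]
      by_cases hc : c = name
      · rw [if_pos hc, if_pos hc, ih m' (k + 1)]
        rw [show k + 1 + (m' : Int) = k + ((m' : Int) + 1) from by ring]
        simp
      · rw [if_neg hc, if_neg hc, ih m' (k + 1)]
        rw [show k + 1 + (m' : Int) = k + ((m' : Int) + 1) from by ring]
        simp

theorem pvScan_eq (name : String) (cl : List String) :
    ∀ (k : Int), pvScan name (PySem.List.enumerate cl k)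
      = match idxsFrom cl k name with
        | [] => none
        | j :: _ => some (j, PySem.List.enumerate (cl.drop ((j - k).toNat + 1)) (j + 1)) := by
  induction cl with
  | nil => intro k; simp [PySem.List.enumerate_nil, pvScan, idxsFrom]
  | cons c r ih =>
    intro k
    rw [PySem.List.enumerate_cons]
    by_cases hc : c = name
    · simp [pvScan, hc, idxsFrom]
    · simp only [pvScan, if_neg hc, idxsFrom, ih (k + 1)]
      cases hfi : idxsFrom r (k + 1) name with
      | nil => simp
      | cons j t =>
        have hj : k + 1 ≤ j := (idxsFrom_bounds r name (k + 1) j (by simp [hfi])).1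
        have : (j - k).toNat = (j - (k + 1)).toNat + 1 := by omega
        simp [this]

-- binary-search boundary characterisation
theorem pvBisect_spec (idxs : List Int) (prev : Int)
    (hmono : ∀ p q : Nat, p ≤ q → q < idxs.length → idxs.getD p 0 ≤ idxs.getD q 0) :
    ∀ (fuel lo hi : Nat), hi - lo ≤ fuel → lo ≤ hi → hi ≤ idxs.length →
    (∀ m : Nat, m < lo → idxs.getD m 0 ≤ prev) →
    (∀ m : Nat, hi ≤ m → m < idxs.length → prev < idxs.getD m 0) →
    lo ≤ pvBisect idxs prev lo hi ∧ pvBisect idxs prev lo hi ≤ hi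
      ∧ (∀ m : Nat, m < pvBisect idxs prev lo hi → idxs.getD m 0 ≤ prev)
      ∧ (∀ m : Nat, pvBisect idxs prev lo hi ≤ m → m < idxs.length → prev < idxs.getD m 0) := by
  intro fuel
  induction fuel with
  | zero =>
    intro lo hi hf hlh hhl Plo Phi
    have : lo = hi := by omega
    subst this
    rw [pvBisect]
    simp only [Nat.lt_irrefl, if_false]
    exact ⟨le_refl _, le_refl _, Plo, Phi⟩
  | succ f ih =>
    intro lo hi hf hlh hhl Plo Phi
    rw [pvBisect]
    by_cases h : lo < hi
    · rw [if_pos h]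
      set mid := (lo + hi) / 2 with hmid
      have hm1 : lo ≤ mid := by omega
      have hm2 : mid < hi := by omega
      by_cases hg : idxs.getD mid 0 > prev
      · rw [if_pos hg]
        have Phi' : ∀ m : Nat, mid ≤ m → m < idxs.length → prev < idxs.getD m 0 := by
          intro m hm hml
          exact lt_of_lt_of_le hg (hmono mid m hm hml)
        have := ih lo mid (by omega) (by omega) (by omega) Plo Phi'
        exact ⟨this.1, by omega, this.2.2.1, this.2.2.2⟩
      · rw [if_neg hg]
        have hg' : idxs.getD mid 0 ≤ prev := by omega
        have Plo' : ∀ m : Nat, m < mid + 1 → idxs.getD m 0 ≤ prev := by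
          intro m hm
          exact le_trans (hmono m mid (by omega) (by omega)) hg'
        have := ih (mid + 1) hi (by omega) (by omega) hhl Plo' Phi
        exact ⟨by omega, this.2.1, this.2.2.1, this.2.2.2⟩
    · rw [if_neg h]
      have : lo = hi := by omega
      subst this
      exact ⟨le_refl _, le_refl _, Plo, Phi⟩

theorem pvGetD_mem (l : List Int) (m : Nat) (h : m < l.length) : l.getD m 0 ∈ l := by
  rw [List.getD_eq_getElem l 0 h]
  exact List.getElem_mem h

theorem pvGetD_append_length (A : List Int) (j : Int) (t : List Int) :
    (A ++ j :: t).getD A.length 0 = j := by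
  rw [List.getD_eq_getElem _ 0 (by simp)]
  simp

-- B's loop equals the reference scan
theorem pvGoAlt_eq (cl : List String) : ∀ (bs : List String) (prev : Int) (ci : Nat) (ms : List Int),
    (ci : Int) = prev + 1 →
    pvGoAlt bs (pvPositions cl) prev ms
      = pvRef bs (PySem.List.enumerate (cl.drop ci) (ci : Int)) ms := by
  intro bs
  induction bs with
  | nil => intro prev ci ms _; simp [pvGoAlt, pvRef]
  | cons name rest ih =>
    intro prev ci ms hci
    have hAle : ∀ x ∈ idxsFrom (cl.take ci) 0 name, x ≤ prev := by
      intro x hx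
      have h1 := idxsFrom_bounds (cl.take ci) name 0 x hx
      have h2 : (cl.take ci).length ≤ ci := by simp
      omega
    have hBge : ∀ x ∈ idxsFrom (cl.drop ci) (ci : Int) name, prev < x := by
      intro x hx
      have := idxsFrom_bounds (cl.drop ci) name (ci : Int) x hx
      omega
    have hps : (pvPositions cl).getD name []
        = idxsFrom (cl.take ci) 0 name ++ idxsFrom (cl.drop ci) (ci : Int) name := by
      rw [pvPositions_getD]
      have := idxsFrom_split cl name ci 0
      simpa using this
    have hsort : (idxsFrom (cl.take ci) 0 name ++ idxsFrom (cl.drop ci) (ci : Int) name).Pairwise (· < ·) := by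
      rw [← hps, pvPositions_getD]
      exact idxsFrom_sorted cl name 0
    cases hB : idxsFrom (cl.drop ci) (ci : Int) name with
    | nil =>
      rw [hB] at hps
      set A := idxsFrom (cl.take ci) 0 name with hAdef
      simp only [List.append_nil] at hps
      have hmono : ∀ p q : Nat, p ≤ q → q < A.length → A.getD p 0 ≤ A.getD q 0 := by
        intro p q hpq hq
        rcases Nat.lt_or_ge p q with h | h
        · have := (List.pairwise_iff_getElem.mp (by rw [hB] at hsort; simpa using hsort)) p q (by omega) hq h
          rw [List.getD_eq_getElem A 0 (by omega), List.getD_eq_getElem A 0 hq]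
          exact le_of_lt this
        · have : p = q := by omega
          subst this; rfl
      have hspec := pvBisect_spec A prev hmono A.length 0 A.length (by omega) (by omega) (le_refl _)
        (by intro m hm; omega) (by intro m hm hml; omega)
      have hr : pvBisect A prev 0 A.length = A.length := by
        rcases Nat.lt_or_ge (pvBisect A prev 0 A.length) A.length with h | h
        · have h1 := hspec.2.2.2 (pvBisect A prev 0 A.length) (le_refl _) h
          have h2 := hAle _ (pvGetD_mem A _ h)
          omega
        · omega
      simp only [pvGoAlt, pvRef, hps, hr]
      rw [pvScan_eq name (cl.drop ci) (ci : Int), hB]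
      simp
    | cons j t =>
      rw [hB] at hps
      set A := idxsFrom (cl.take ci) 0 name with hAdef
      set L := A ++ j :: t with hLdef
      have hjmem : prev < j := hBge j (by rw [hB]; exact List.mem_cons_self)
      have hjlo : (ci : Int) ≤ j := (idxsFrom_bounds (cl.drop ci) name (ci : Int) j (by rw [hB]; exact List.mem_cons_self)).1
      have hlen : L.length = A.length + t.length + 1 := by simp [hLdef]; omega
      have hmono : ∀ p q : Nat, p ≤ q → q < L.length → L.getD p 0 ≤ L.getD q 0 := by
        intro p q hpq hq
        rcases Nat.lt_or_ge p q with h | h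
        · have := (List.pairwise_iff_getElem.mp (by rw [hB] at hsort; exact hsort)) p q (by omega) hq h
          rw [List.getD_eq_getElem L 0 (by omega), List.getD_eq_getElem L 0 hq]
          exact le_of_lt this
        · have : p = q := by omega
          subst this; rfl
      have hspec := pvBisect_spec L prev hmono L.length 0 L.length (by omega) (by omega) (le_refl _)
        (by intro m hm; omega) (by intro m hm hml; omega)
      have hgA : L.getD A.length 0 = j := pvGetD_append_length A j t
      have hr : pvBisect L prev 0 L.length = A.length := by
        rcases Nat.lt_trichotomy (pvBisect L prev 0 L.length) A.length with h | h | h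
        · have h1 := hspec.2.2.2 (pvBisect L prev 0 L.length) (le_refl _) (by omega)
          have h2 : L.getD (pvBisect L prev 0 L.length) 0 ∈ A := by
            rw [hLdef, List.getD_append _ _ _ _ h]
            exact pvGetD_mem A _ h
          have := hAle _ h2
          omega
        · exact h
        · have h1 := hspec.2.2.1 A.length h
          omega
      have hne : ¬ (A.length = L.length) := by omega
      simp only [pvGoAlt, pvRef, hps, hr]
      rw [if_neg (by omega : ¬ A.length = L.length), hgA]
      have hscan : pvScan name (PySem.List.enumerate (cl.drop ci) (ci : Int))
          = some (j, PySem.List.enumerate (cl.drop (j.toNat + 1)) (j + 1)) := by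
        rw [pvScan_eq name (cl.drop ci) (ci : Int), hB]
        simp
        rw [show ci + (j.toNat - ci + 1) = j.toNat + 1 from by omega]
      rw [hscan]
      have hcast : ((j.toNat + 1 : Nat) : Int) = j + 1 := by omega
      have hih := ih j (j.toNat + 1) (ms ++ [j]) (by omega)
      rw [hcast] at hih
      exact hih

-- ===== VERDICT (by name: the statement is the Claim_ definition above) =====
theorem is_subsequence_with_matches_py_spec : Claim_equal_is_subsequence_with_matches_py := by
  intro baseline_names current_names _
  unfold Spec_is_subsequence_with_matches_py is_subsequence_with_matches_py is_subsequence_with_matches_py_alt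
  rw [pvGoAlt_eq current_names baseline_names (-1) 0 [] (by norm_num)]
  simpa using pvGo_key baseline_names current_names (current_names.length - 0) 0 0 [] rfl (by omega)
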